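-- pv_equiv track=rewrite | github.com/BASE-Laboratory/BraggTrack | braggtrack/segmentation/postprocess.py | relabel_sequential
-- ===== SOURCE A (Python) =====
-- def relabel_sequential(labels: list[list[list[int]]]) -> list[list[list[int]]]:
--     mapping: dict[int, int] = {}
--     next_id = 1
--     out = []
--     for plane in labels:
--         out_plane = []
--         for row in plane:
--             out_row = []
--             for v in row:
--                 if v <= 0:
--                     out_row.append(0)
--                 else:
--                     if v not in mapping:
--                         mapping[v] = next_id
--                         next_id += 1
--                     out_row.append(mapping[v])
--             out_plane.append(out_row)
--         out.append(out_plane)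
--     return out
-- ===== SOURCE B (Python) =====
-- def relabel_sequential(labels: list[list[list[int]]]) -> list[list[list[int]]]:
--     # Pass 1: build the first-appearance relabel table.
--     seen: dict[int, int] = {}
--     for plane in labels:
--         for row in plane:
--             for v in row:
--                 if v > 0 and v not in seen:
--                     seen[v] = len(seen) + 1
--     # Pass 2: apply the table.
--     return [[[seen.get(v, 0) if v > 0 else 0 for v in row] for row in plane]
--             for plane in labels]
-- ===== Notes on version B (the rewrite author's own statement) =====
-- stated objective: alternative
-- what changed: A relabels in a single fused pass that threads a mapping, a counter and the growing output together; B first builds the first-appearance table in a pure table-building pass and then rebuilds the 3D structure in a separate apply pass with nested comprehensions.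
import Mathlib
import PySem

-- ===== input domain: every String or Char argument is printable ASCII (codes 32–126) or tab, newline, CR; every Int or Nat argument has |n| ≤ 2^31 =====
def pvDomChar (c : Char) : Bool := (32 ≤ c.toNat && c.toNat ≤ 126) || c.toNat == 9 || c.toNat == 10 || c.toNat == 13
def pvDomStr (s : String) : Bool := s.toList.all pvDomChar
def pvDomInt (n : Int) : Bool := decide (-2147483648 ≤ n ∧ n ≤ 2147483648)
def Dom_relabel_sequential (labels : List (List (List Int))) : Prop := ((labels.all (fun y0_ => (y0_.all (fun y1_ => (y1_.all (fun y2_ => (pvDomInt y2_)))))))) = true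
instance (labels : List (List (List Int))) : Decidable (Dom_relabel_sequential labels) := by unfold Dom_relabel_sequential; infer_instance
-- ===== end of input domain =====

-- B replaces A's single fused relabel-while-copying pass by two passes: build the
-- first-appearance table, then apply it (objective: alternative decomposition).

-- ===== PORT A =====
-- innermost loop body of A: one value v against state (mapping, next_id, out_row)
def pvStepA (s : PySem.Dict Int Int × Int × List Int) (v : Int) :
    PySem.Dict Int Int × Int × List Int :=
  let m := s.1; let n := s.2.1; let r := s.2.2
  if v ≤ 0 then (m, n, r ++ [(0 : Int)])
  else
    -- if v not in mapping: mapping[v] = next_id; next_id += 1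
    let mn := if !(m.contains v) then (m.insert v n, n + 1) else (m, n)
    (mn.1, mn.2, r ++ [mn.1.getD v 0])

-- middle loop body of A: one row against state (mapping, next_id, out_plane)
def pvRowStepA (s : PySem.Dict Int Int × Int × List (List Int)) (row : List Int) :
    PySem.Dict Int Int × Int × List (List Int) :=
  let t := row.foldl pvStepA (s.1, s.2.1, ([] : List Int))
  (t.1, t.2.1, s.2.2 ++ [t.2.2])

-- outer loop body of A: one plane against state (mapping, next_id, out)
def pvPlaneStepA (s : PySem.Dict Int Int × Int × List (List (List Int))) (plane : List (List Int)) :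
    PySem.Dict Int Int × Int × List (List (List Int)) :=
  let t := plane.foldl pvRowStepA (s.1, s.2.1, ([] : List (List Int)))
  (t.1, t.2.1, s.2.2 ++ [t.2.2])

def relabel_sequential (labels : List (List (List Int))) : List (List (List Int)) :=
  (labels.foldl pvPlaneStepA (PySem.Dict.empty, 1, ([] : List (List (List Int))))).2.2

-- ===== PORT B =====
-- pass 1: if v > 0 and v not in seen: seen[v] = len(seen) + 1
def pvStepB (m : PySem.Dict Int Int) (v : Int) : PySem.Dict Int Int :=
  if 0 < v && !(m.contains v) then m.insert v ((m.size : Int) + 1) else m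

def pvBuildRowB (m : PySem.Dict Int Int) (row : List Int) : PySem.Dict Int Int :=
  row.foldl pvStepB m

def pvBuildPlaneB (m : PySem.Dict Int Int) (plane : List (List Int)) : PySem.Dict Int Int :=
  plane.foldl pvBuildRowB m

def pvBuildB (labels : List (List (List Int))) : PySem.Dict Int Int :=
  labels.foldl pvBuildPlaneB PySem.Dict.empty

-- pass 2: seen.get(v, 0) if v > 0 else 0
def pvApplyB (seen : PySem.Dict Int Int) (v : Int) : Int :=
  if 0 < v then seen.getD v 0 else 0

def relabel_sequential_alt (labels : List (List (List Int))) : List (List (List Int)) :=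
  let seen := pvBuildB labels
  labels.map (fun plane => plane.map (fun row => row.map (pvApplyB seen)))

-- ===== PRECONDITION & SPEC =====
def Spec_relabel_sequential (labels : List (List (List Int))) (out : List (List (List Int))) : Prop := out = relabel_sequential_alt labels
instance (labels : List (List (List Int))) (out : List (List (List Int))) : Decidable (Spec_relabel_sequential labels out) := by unfold Spec_relabel_sequential; infer_instance

-- ===== CLAIM (what is proved, stated in full; the proofs are below) =====
def Claim_equal_relabel_sequential : Prop := ∀ (labels : List (List (List Int))), Dom_relabel_sequential labels → Spec_relabel_sequential labels (relabel_sequential labels)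

-- ===== LEMMAS AND PROOFS =====

-- `ExtD m M`: every binding of m is still visible in M (B's table only grows with fresh keys)
def ExtD (m M : PySem.Dict Int Int) : Prop := ∀ k v, m.get? k = some v → M.get? k = some v

theorem extD_stepB (m : PySem.Dict Int Int) (v : Int) : ExtD m (pvStepB m v) := by
  intro k w h
  unfold pvStepB
  split
  · rename_i hc
    have hk : k ≠ v := by
      intro he; subst he
      have : m.contains k = (m.get? k).isSome := PySem.Dict.contains_eq_isSome_get? m k
      simp [h] at this
      simp [this] at hc
    rw [PySem.Dict.get?_insert_of_ne _ _ hk]; exact h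
  · exact h

theorem extD_buildRow (row : List Int) : ∀ m, ExtD m (pvBuildRowB m row) := by
  induction row with
  | nil => intro m k w h; exact h
  | cons v rest ih =>
    intro m k w h
    exact ih (pvStepB m v) k w (extD_stepB m v k w h)

theorem extD_buildPlane (plane : List (List Int)) : ∀ m, ExtD m (pvBuildPlaneB m plane) := by
  induction plane with
  | nil => intro m k w h; exact h
  | cons row rest ih =>
    intro m k w h
    exact ih (pvBuildRowB m row) k w (extD_buildRow row m k w h)

-- one value of A's inner loop = one step of B's table plus the table lookup
theorem stepA_eq (m M : PySem.Dict Int Int) (acc : List Int) (v : Int)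
    (hE : ExtD (pvStepB m v) M) :
    pvStepA (m, ((m.size : Int) + 1, acc)) v
      = (pvStepB m v, ((pvStepB m v).size : Int) + 1, acc ++ [pvApplyB M v]) := by
  unfold pvStepA pvApplyB
  by_cases hv : v ≤ 0
  · have h0 : ¬ (0 < v) := by omega
    simp only [hv, if_true]
    have hB : pvStepB m v = m := by unfold pvStepB; simp [h0]
    simp [hB, h0]
  · have h0 : 0 < v := by omega
    simp only [hv, if_false]
    by_cases hc : m.contains v
    · have hB : pvStepB m v = m := by unfold pvStepB; simp [hc]
      have hsome : (m.get? v).isSome := by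
        rw [← PySem.Dict.contains_eq_isSome_get?]; exact hc
      obtain ⟨w, hw⟩ := Option.isSome_iff_exists.mp hsome
      have hM : M.get? v = some w := hE v w (by rw [hB]; exact hw)
      simp [hc, h0, hB, PySem.Dict.getD_of_get?_eq_some _ _ hw,
        PySem.Dict.getD_of_get?_eq_some _ _ hM]
    · have hB : pvStepB m v = m.insert v ((m.size : Int) + 1) := by
        unfold pvStepB; simp [h0, hc]
      have hins : (m.insert v ((m.size : Int) + 1)).get? v = some ((m.size : Int) + 1) :=
        PySem.Dict.get?_insert_self m v _
      have hM : M.get? v = some ((m.size : Int) + 1) := hE v _ (by rw [hB]; exact hins)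
      have hsz : (m.insert v ((m.size : Int) + 1)).size = m.size + 1 := by
        rw [PySem.Dict.size_insert]; simp [hc]
      simp [hc, h0, hB, hsz, PySem.Dict.getD_of_get?_eq_some _ _ hins,
        PySem.Dict.getD_of_get?_eq_some _ _ hM]

-- A's inner loop over a row = B's table fold plus the mapped row
theorem rowA_eq (row : List Int) : ∀ (m M : PySem.Dict Int Int) (acc : List Int),
    ExtD (pvBuildRowB m row) M →
    row.foldl pvStepA (m, ((m.size : Int) + 1, acc))
      = (pvBuildRowB m row, ((pvBuildRowB m row).size : Int) + 1,
         acc ++ row.map (pvApplyB M)) := by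
  induction row with
  | nil => intro m M acc _; simp [pvBuildRowB]
  | cons v rest ih =>
    intro m M acc hE
    have hE1 : ExtD (pvStepB m v) M := fun k w h =>
      hE k w (extD_buildRow rest (pvStepB m v) k w h)
    have hstep := stepA_eq m M acc v hE1
    simp only [List.foldl_cons, hstep]
    have := ih (pvStepB m v) M (acc ++ [pvApplyB M v]) (by exact hE)
    simpa [pvBuildRowB, List.append_assoc] using this

-- A's middle loop over a plane
theorem planeA_eq (plane : List (List Int)) :
    ∀ (m M : PySem.Dict Int Int) (acc : List (List Int)),
    ExtD (pvBuildPlaneB m plane) M →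
    plane.foldl pvRowStepA (m, ((m.size : Int) + 1, acc))
      = (pvBuildPlaneB m plane, ((pvBuildPlaneB m plane).size : Int) + 1,
         acc ++ plane.map (fun row => row.map (pvApplyB M))) := by
  induction plane with
  | nil => intro m M acc _; simp [pvBuildPlaneB]
  | cons row rest ih =>
    intro m M acc hE
    have hE1 : ExtD (pvBuildRowB m row) M := fun k w h =>
      hE k w (extD_buildPlane rest (pvBuildRowB m row) k w h)
    have hrow := rowA_eq row m M ([] : List Int) hE1
    simp only [List.foldl_cons]
    have hstep : pvRowStepA (m, ((m.size : Int) + 1, acc)) row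
        = (pvBuildRowB m row, ((pvBuildRowB m row).size : Int) + 1,
           acc ++ [row.map (pvApplyB M)]) := by
      unfold pvRowStepA
      simp [hrow]
    rw [hstep]
    have := ih (pvBuildRowB m row) M (acc ++ [row.map (pvApplyB M)]) (by exact hE)
    simpa [pvBuildPlaneB, List.append_assoc] using this

theorem extD_foldlPlanes (ls : List (List (List Int))) :
    ∀ m, ExtD m (ls.foldl pvBuildPlaneB m) := by
  induction ls with
  | nil => intro m k w h; exact h
  | cons p r ih =>
    intro m k w h
    exact ih (pvBuildPlaneB m p) k w (extD_buildPlane p m k w h)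

-- A's outer loop over all planes
theorem allA_eq (labels : List (List (List Int))) :
    ∀ (m M : PySem.Dict Int Int) (acc : List (List (List Int))),
    ExtD (labels.foldl pvBuildPlaneB m) M →
    labels.foldl pvPlaneStepA (m, ((m.size : Int) + 1, acc))
      = (labels.foldl pvBuildPlaneB m, ((labels.foldl pvBuildPlaneB m).size : Int) + 1,
         acc ++ labels.map (fun plane => plane.map (fun row => row.map (pvApplyB M)))) := by
  induction labels with
  | nil => intro m M acc _; simp
  | cons plane rest ih =>
    intro m M acc hE
    have hE1 : ExtD (pvBuildPlaneB m plane) M := fun k w h =>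
      hE k w (extD_foldlPlanes rest (pvBuildPlaneB m plane) k w h)
    have hplane := planeA_eq plane m M ([] : List (List Int)) hE1
    simp only [List.foldl_cons]
    have hstep : pvPlaneStepA (m, ((m.size : Int) + 1, acc)) plane
        = (pvBuildPlaneB m plane, ((pvBuildPlaneB m plane).size : Int) + 1,
           acc ++ [plane.map (fun row => row.map (pvApplyB M))]) := by
      unfold pvPlaneStepA
      simp [hplane]
    rw [hstep]
    have := ih (pvBuildPlaneB m plane) M (acc ++ [plane.map (fun row => row.map (pvApplyB M))]) (by exact hE)
    simpa [List.append_assoc] using this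

-- ===== VERDICT (by name: the statement is the Claim_ definition above) =====
theorem relabel_sequential_spec : Claim_equal_relabel_sequential := by
  intro labels _
  unfold Spec_relabel_sequential relabel_sequential relabel_sequential_alt
  have h := allA_eq labels PySem.Dict.empty (pvBuildB labels) ([] : List (List (List Int)))
    (by unfold pvBuildB; exact fun k w h => h)
  simp only [PySem.Dict.size_empty] at h
  norm_num at h
  rw [show (1 : Int) = (((PySem.Dict.empty : PySem.Dict Int Int).size : Int) + 1) by simp] at *
  simp [pvBuildB] at h ⊢
  rw [h]
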